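-- pv_equiv track=rewrite | github.com/PhotonicGluon/The-Challenge | the_challenge/misc/totp.py | base32_to_hexadecimal
-- ===== SOURCE A (Python) =====
-- def pad_left(string, length, padding_character):
--     """
--     Pads the left of `string` using the `padding_character` so as to make the final string have a length of `length`.
--
--     Args:
--         string (str):               The string that needs padding.
--         length (int):               The length of the final string.
--         padding_character (str):    The character that will be used to pad the left of the string.
--
--     Returns:
--         str:    The padded string.
--     """
--
--     return string.rjust(length, padding_character)
--
-- def base32_to_hexadecimal(base32):
--     """
--     Converts a base32 string to a hexadecimal string.
--
--     Args:
--         base32 (str): The base32 string.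
--
--     Returns:
--         str: The hexadecimal string.
--     """
--
--     base32chars = "ABCDEFGHIJKLMNOPQRSTUVWXYZ234567"
--
--     bits = ""
--     for i in range(len(base32)):
--         val = base32chars.index(base32[i].upper())
--         bits += pad_left(bin(val)[2:], 5, "0")
--
--     hexadecimal = ""
--     for i in range(0, len(bits) - 3, 4):
--         chunk = bits[i:i + 4]
--         hexadecimal += hex(int(chunk, 2))[2:]
--
--     return hexadecimal
-- ===== SOURCE B (Python) =====
-- def base32_to_hexadecimal(base32):
--     """
--     Converts a base32 string to a hexadecimal string.
--
--     Streaming rewrite: instead of building an intermediate bit string and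
--     rescanning it in 4-character slices, keep a small bit buffer and emit
--     each hex digit as soon as 4 bits are available (single pass).
--     """
--
--     base32chars = "ABCDEFGHIJKLMNOPQRSTUVWXYZ234567"
--     hexdigits = "0123456789abcdef"
--
--     out = []
--     acc = 0
--     nbits = 0
--     for c in base32:
--         acc = acc * 32 + base32chars.index(c.upper())
--         nbits += 5
--         while nbits >= 4:
--             nbits -= 4
--             out.append(hexdigits[acc >> nbits])
--             acc &= (1 << nbits) - 1
--     return ''.join(out)
-- ===== Notes on version B (the rewrite author's own statement) =====
-- stated objective: faster
-- what changed: Replaces A's two passes over an intermediate 5n-character bit string (built by string concatenation, then rescanned in 4-character slices, each parsed with int(...,2) and hex-formatted) by a single streaming pass that keeps a small integer bit buffer and emits each hex digit as soon as 4 bits are available.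
import Mathlib
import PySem

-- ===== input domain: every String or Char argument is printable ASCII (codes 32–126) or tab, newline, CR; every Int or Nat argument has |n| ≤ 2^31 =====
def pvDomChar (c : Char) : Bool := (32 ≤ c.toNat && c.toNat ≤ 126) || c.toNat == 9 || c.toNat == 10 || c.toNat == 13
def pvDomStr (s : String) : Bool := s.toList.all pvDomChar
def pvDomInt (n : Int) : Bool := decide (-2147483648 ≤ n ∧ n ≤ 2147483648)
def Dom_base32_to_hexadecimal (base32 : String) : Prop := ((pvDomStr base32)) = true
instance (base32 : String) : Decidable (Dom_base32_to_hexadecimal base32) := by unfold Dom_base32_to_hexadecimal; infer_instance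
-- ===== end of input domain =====

-- B replaces A's bit-string building and chunked rescanning by a single
-- streaming pass with a small bit buffer, emitting each hex digit as soon as
-- 4 bits are available (objective: faster, constant-factor).

-- the base32 alphabet (the local constant `base32chars` of both Pythons)
def pvB32 : List Char := "ABCDEFGHIJKLMNOPQRSTUVWXYZ234567".toList

-- hex digits of n (lowercase), i.e. hex(n)[2:] / format(n, 'x'); exact for 0 ≤ n
def hexDigitChar (n : Nat) : Char := if n < 10 then Char.ofNat (48 + n) else Char.ofNat (87 + n)

def hexChars (n : Nat) : List Char :=
  if n < 16 then [hexDigitChar n]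
  else hexChars (n / 16) ++ [hexDigitChar (n % 16)]
  decreasing_by exact Nat.div_lt_self (by omega) (by omega)

-- ===== PORT A =====

-- port of the helper pad_left (str.rjust)
def pad_left (string : List Char) (length : Nat) (padding_character : Char) : List Char :=
  List.replicate (length - string.length) padding_character ++ string

def base32_to_hexadecimal (base32 : String) : String :=
  let chars := base32.toList
  let bits : List Char :=
    (PySem.List.pyRange 0 (PySem.List.len chars)).foldl
      (fun bits i =>
        -- val = base32chars.index(base32[i].upper()); ValueError (index? = none) excluded by Pre_
        let val : Nat :=
          (PySem.List.index? pvB32 (PySem.Chars.upperChar (PySem.List.pyGetD chars i ' '))).getD 0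
        bits ++ pad_left (PySem.Int.toBinChars (val : Int)) 5 '0') []
  let hexadecimal : List Char :=
    (PySem.List.pyRange 0 (PySem.List.len bits - 3) 4).foldl
      (fun h i =>
        -- chunk = bits[i:i+4]; hex(int(chunk, 2))[2:] — int(chunk, 2) is a nonnegative 4-bit value here
        h ++ hexChars ((PySem.Int.ofCharsBase? (PySem.List.slice bits (some i) (some (i + 4))) 2).getD 0).toNat) []
  String.mk hexadecimal

-- ===== PORT B =====

-- the hexdigits constant of B
def pvHexdigits : List Char := "0123456789abcdef".toList

-- B's inner while loop: while nbits >= 4, emit the top 4 bits as a hex digit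
def pvDrain (out : List Char) (acc : Nat) (nbits : Nat) : List Char × Nat × Nat :=
  if h : 4 ≤ nbits then
    pvDrain (out ++ [PySem.List.pyGetD pvHexdigits ((acc >>> (nbits - 4) : Nat) : Int) ' '])
      (acc &&& ((1 <<< (nbits - 4)) - 1)) (nbits - 4)
  else (out, acc, nbits)
  decreasing_by omega

def base32_to_hexadecimal_alt (base32 : String) : String :=
  let st := base32.toList.foldl
    (fun (st : List Char × Nat × Nat) c =>
      pvDrain st.1 (st.2.1 * 32 + (PySem.List.index? pvB32 (PySem.Chars.upperChar c)).getD 0)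
        (st.2.2 + 5))
    ([], 0, 0)
  String.mk st.1

-- ===== PRECONDITION & SPEC =====

-- Pre_ excludes exactly the inputs with a character (after .upper()) outside the
-- base32 alphabet, where both Pythons raise ValueError from str.index.
def Pre_base32_to_hexadecimal (base32 : String) : Prop :=
  (base32.toList.all
    (fun c => ("ABCDEFGHIJKLMNOPQRSTUVWXYZ234567".toList).contains (PySem.Chars.upperChar c))) = true
instance (base32 : String) : Decidable (Pre_base32_to_hexadecimal base32) := by
  unfold Pre_base32_to_hexadecimal; infer_instance

def pvWitness_base32_to_hexadecimal : String := "JBSWy3dp"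

def Spec_base32_to_hexadecimal (base32 : String) (out : String) : Prop := out = base32_to_hexadecimal_alt base32
instance (base32 : String) (out : String) : Decidable (Spec_base32_to_hexadecimal base32 out) := by unfold Spec_base32_to_hexadecimal; infer_instance

-- ===== CLAIM (what is proved, stated in full; the proofs are below) =====
def Claim_equal_base32_to_hexadecimal : Prop := ∀ (base32 : String), Dom_base32_to_hexadecimal base32 → Pre_base32_to_hexadecimal base32 → Spec_base32_to_hexadecimal base32 (base32_to_hexadecimal base32)

-- ===== LEMMAS AND PROOFS =====

-- value of a big-endian bit string ('1' counts 1, anything else 0)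
def bitVal : List Char → Nat
  | [] => 0
  | c :: cs => (if c = '1' then 1 else 0) * 2 ^ cs.length + bitVal cs

-- big-endian hex digits of n, exactly q of them (n truncated mod 16^q)
def digitsBE : Nat → Nat → List Char
  | _, 0 => []
  | n, q + 1 => hexDigitChar (n / 16 ^ q) :: digitsBE (n % 16 ^ q) q

-- what A's first loop appends for one input character c
def pvF (c : Char) : List Char :=
  pad_left (PySem.Int.toBinChars
    (((PySem.List.index? pvB32 (PySem.Chars.upperChar c)).getD 0 : Nat) : Int)) 5 '0'

theorem bitVal_lt (cs : List Char) : bitVal cs < 2 ^ cs.length := by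
  induction cs with
  | nil => simp [bitVal]
  | cons c cs ih =>
    simp only [bitVal, List.length_cons, pow_succ]
    split <;> omega

theorem bitVal_append (xs ys : List Char) :
    bitVal (xs ++ ys) = bitVal xs * 2 ^ ys.length + bitVal ys := by
  induction xs with
  | nil => simp [bitVal]
  | cons c cs ih =>
    simp only [List.cons_append, bitVal, List.length_append, ih, pow_add]
    ring

set_option maxRecDepth 8192 in
theorem pad5_spec (v : Nat) (hv : v < 32) :
    (pad_left (PySem.Int.toBinChars (v : Int)) 5 '0').length = 5 ∧
    bitVal (pad_left (PySem.Int.toBinChars (v : Int)) 5 '0') = v ∧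
    (pad_left (PySem.Int.toBinChars (v : Int)) 5 '0').all (fun c => c == '0' || c == '1') = true := by
  interval_cases v <;> exact ⟨by decide, by decide, by decide⟩

theorem idx_lt (c : Char) : (PySem.List.index? pvB32 c).getD 0 < 32 := by
  cases h : PySem.List.index? pvB32 c with
  | none => simp
  | some k =>
    obtain ⟨pre, suf, heq, hlen, -⟩ := (PySem.List.index?_eq_some_iff pvB32 c k).1 h
    have h32 : pvB32.length = 32 := by decide
    rw [heq] at h32
    simp only [List.length_append, List.length_cons] at h32
    simp [← hlen]
    omega

theorem chunk_parse (a b c d : Char)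
    (ha : a = '0' ∨ a = '1') (hb : b = '0' ∨ b = '1')
    (hc : c = '0' ∨ c = '1') (hd : d = '0' ∨ d = '1') :
    PySem.Int.ofCharsBase? [a, b, c, d] 2 = some ((bitVal [a, b, c, d] : Nat) : Int) := by
  rcases ha with rfl | rfl <;> rcases hb with rfl | rfl <;>
    rcases hc with rfl | rfl <;> rcases hd with rfl | rfl <;> decide

theorem hexChars_lt16 {n : Nat} (h : n < 16) : hexChars n = [hexDigitChar n] := by
  rw [hexChars]; simp [h]

theorem shift_lt (w q r : Nat) (hw : w < 2 ^ (4 * q + r)) : w / 2 ^ r < 16 ^ q := by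
  have hpow : 2 ^ (4 * q + r) = 16 ^ q * 2 ^ r := by
    rw [show (16 : Nat) = 2 ^ 4 by norm_num, ← pow_mul, ← pow_add, Nat.add_comm]
  rw [Nat.div_lt_iff_lt_mul (by positivity)]
  calc w < 2 ^ (4 * q + r) := hw
    _ = 16 ^ q * 2 ^ r := hpow

theorem pow_split (q r : Nat) : (2 : Nat) ^ (4 * q + r) = 16 ^ q * 2 ^ r := by
  rw [show (16 : Nat) = 2 ^ 4 by norm_num, ← pow_mul, ← pow_add, Nat.add_comm]

theorem peel_div (v w q r : Nat) :
    (v * 2 ^ (4 * q + r) + w) / 2 ^ r = v * 16 ^ q + w / 2 ^ r := by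
  rw [pow_split, show v * (16 ^ q * 2 ^ r) + w = w + (v * 16 ^ q) * 2 ^ r by ring,
    Nat.add_mul_div_right _ _ (by positivity : 0 < (2:Nat) ^ r)]
  ring

theorem peel_mod (v w q r : Nat) :
    (v * 2 ^ (4 * q + r) + w) % 2 ^ r = w % 2 ^ r := by
  rw [pow_split, show v * (16 ^ q * 2 ^ r) + w = w + (v * 16 ^ q) * 2 ^ r by ring,
    Nat.add_mul_mod_self_right]

-- the two division facts used when one 4-bit chunk is peeled off the front
theorem peel_arith (v w q r : Nat) (hw : w < 2 ^ (4 * q + r)) :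
    (v * 2 ^ (4 * q + r) + w) / 2 ^ r / 16 ^ q = v ∧
    (v * 2 ^ (4 * q + r) + w) / 2 ^ r % 16 ^ q = w / 2 ^ r := by
  have hwlt : w / 2 ^ r < 16 ^ q := shift_lt w q r hw
  have hdiv : (v * 2 ^ (4 * q + r) + w) / 2 ^ r = w / 2 ^ r + v * 16 ^ q := by
    rw [peel_div]; ring
  constructor
  · rw [hdiv, Nat.add_mul_div_right _ _ (by positivity), Nat.div_eq_of_lt hwlt]
    omega
  · rw [hdiv, Nat.add_mul_mod_self_right, Nat.mod_eq_of_lt hwlt]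

-- A's chunk range is the first bits.length/4 multiples of 4
theorem pyRange_chunks (L : Nat) :
    PySem.List.pyRange 0 ((L : Int) - 3) 4 =
      (List.range (L / 4)).map (fun k => ((4 * k : Nat) : Int)) := by
  rw [PySem.List.pyRange_of_pos _ _ (by norm_num)]
  have hcount : (if (0 : Int) < (L : Int) - 3 then (((L : Int) - 3 - 0 + 4 - 1) / 4).toNat else 0)
      = L / 4 := by
    split
    · next h =>
      have heq : ((L : Int) - 3 - 0 + 4 - 1) = (L : Int) := by ring
      rw [heq]
      omega
    · next h => omega
  rw [hcount]
  apply List.map_congr_left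
  intro k _
  push_cast
  ring

-- the second loop, a fold over the chunk starts, writes digitsBE of the shifted value
theorem chunk_fold (q : Nat) : ∀ (bits : List Char) (acc : List Char),
    (∀ c ∈ bits, (c == '0' || c == '1') = true) → bits.length / 4 = q →
    (List.range q).foldl
      (fun h k => h ++ hexChars ((PySem.Int.ofCharsBase?
        (PySem.List.slice bits (some ((4 * k : Nat) : Int)) (some (((4 * k : Nat) : Int) + 4))) 2).getD 0).toNat) acc
    = acc ++ digitsBE (bitVal bits / 2 ^ (bits.length % 4)) q := by
  induction q with
  | zero => intro bits acc _ _; simp [digitsBE]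
  | succ q ih =>
    intro bits acc hbin hq
    have hlen : 4 ≤ bits.length := by omega
    rcases bits with _ | ⟨a, _ | ⟨b, _ | ⟨c, _ | ⟨d, rest⟩⟩⟩⟩ <;> simp at hlen
    have hget : ∀ x ∈ ([a, b, c, d] : List Char), x = '0' ∨ x = '1' := by
      intro x hx
      have hx' : x ∈ a :: b :: c :: d :: rest := by
        simp at hx; rcases hx with rfl | rfl | rfl | rfl <;> simp
      have := hbin x hx'
      simpa using this
    have hparse : PySem.Int.ofCharsBase? [a, b, c, d] 2 = some ((bitVal [a, b, c, d] : Nat) : Int) :=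
      chunk_parse a b c d (hget a (by simp)) (hget b (by simp)) (hget c (by simp)) (hget d (by simp))
    have hv16 : bitVal [a, b, c, d] < 16 := bitVal_lt [a, b, c, d]
    rw [List.range_succ_eq_map]
    simp only [List.foldl_cons, List.foldl_map]
    have hslice0 : PySem.List.slice (a :: b :: c :: d :: rest)
        (some ((4 * 0 : Nat) : Int)) (some (((4 * 0 : Nat) : Int) + 4)) = [a, b, c, d] := by
      rw [PySem.List.slice_toNat _ (by omega) (by omega)]
      norm_num
      rfl
    have hstep : ∀ (h : List Char) (k : Nat),
        h ++ hexChars ((PySem.Int.ofCharsBase? (PySem.List.slice (a :: b :: c :: d :: rest)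
            (some ((4 * (k + 1) : Nat) : Int)) (some (((4 * (k + 1) : Nat) : Int) + 4))) 2).getD 0).toNat
        = h ++ hexChars ((PySem.Int.ofCharsBase? (PySem.List.slice rest
            (some ((4 * k : Nat) : Int)) (some (((4 * k : Nat) : Int) + 4))) 2).getD 0).toNat := by
      intro h k
      have hs : PySem.List.slice (a :: b :: c :: d :: rest)
          (some ((4 * (k + 1) : Nat) : Int)) (some (((4 * (k + 1) : Nat) : Int) + 4))
          = PySem.List.slice rest (some ((4 * k : Nat) : Int)) (some (((4 * k : Nat) : Int) + 4)) := by
        rw [PySem.List.slice_toNat _ (by omega) (by omega),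
            PySem.List.slice_toNat _ (by omega) (by omega)]
        have e1 : (((4 * (k + 1) : Nat) : Int) + 4).toNat = 4 * k + 8 := by omega
        have e2 : (((4 * k : Nat) : Int) + 4).toNat = 4 * k + 4 := by omega
        have e3 : (((4 * (k + 1) : Nat) : Int)).toNat = 4 * k + 4 := by omega
        have e4 : (((4 * k : Nat) : Int)).toNat = 4 * k := by omega
        rw [e1, e2, e3, e4]
        have hdrop : List.drop (4 * k + 4) (a :: b :: c :: d :: rest) = List.drop (4 * k) rest := by
          rw [show 4 * k + 4 = (4 * k) + 1 + 1 + 1 + 1 by ring]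
          simp only [List.drop_succ_cons]
        rw [hdrop]
        congr 1
        omega
      rw [hs]
    calc (List.range q).foldl (fun h k => h ++ hexChars ((PySem.Int.ofCharsBase?
            (PySem.List.slice (a :: b :: c :: d :: rest)
              (some ((4 * (k + 1) : Nat) : Int)) (some (((4 * (k + 1) : Nat) : Int) + 4))) 2).getD 0).toNat)
          (acc ++ hexChars ((PySem.Int.ofCharsBase? (PySem.List.slice (a :: b :: c :: d :: rest)
            (some ((4 * 0 : Nat) : Int)) (some (((4 * 0 : Nat) : Int) + 4))) 2).getD 0).toNat)
        = (List.range q).foldl (fun h k => h ++ hexChars ((PySem.Int.ofCharsBase?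
            (PySem.List.slice rest
              (some ((4 * k : Nat) : Int)) (some (((4 * k : Nat) : Int) + 4))) 2).getD 0).toNat)
          (acc ++ hexChars (bitVal [a, b, c, d])) := by
          rw [hslice0, hparse]
          simp only [Option.getD_some, Int.toNat_natCast]
          refine PySem.List.foldl_congr_mem _ _ _ _ ?_
          intro h k _
          exact hstep h k
      _ = (acc ++ hexChars (bitVal [a, b, c, d]))
            ++ digitsBE (bitVal rest / 2 ^ (rest.length % 4)) q := by
          apply ih
          · intro x hx; exact hbin x (by simp [hx])
          · simp only [List.length_cons] at hq ⊢
            omega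
      _ = acc ++ digitsBE (bitVal (a :: b :: c :: d :: rest) / 2 ^ ((a :: b :: c :: d :: rest).length % 4)) (q + 1) := by
          have hsplit : (a :: b :: c :: d :: rest) = [a, b, c, d] ++ rest := rfl
          have hbv : bitVal (a :: b :: c :: d :: rest)
              = bitVal [a, b, c, d] * 2 ^ rest.length + bitVal rest := by
            rw [hsplit, bitVal_append]
          have hmod4 : (a :: b :: c :: d :: rest).length % 4 = rest.length % 4 := by
            simp only [List.length_cons]; omega
          have hql : rest.length = 4 * q + rest.length % 4 := by
            have : rest.length / 4 = q := by
              simp only [List.length_cons] at hq; omega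
            omega
          have hw : bitVal rest < 2 ^ (4 * q + rest.length % 4) := by
            rw [← hql]; exact bitVal_lt rest
          have harith := peel_arith (bitVal [a, b, c, d]) (bitVal rest) q (rest.length % 4) hw
          have hunf : ∀ n, digitsBE n (q + 1)
              = hexDigitChar (n / 16 ^ q) :: digitsBE (n % 16 ^ q) q := fun n => rfl
          rw [hbv, hmod4,
            show (2 : Nat) ^ rest.length = 2 ^ (4 * q + rest.length % 4) by rw [← hql],
            hunf, harith.1, harith.2, hexChars_lt16 hv16]
          simp

-- indexing a list over range of its length is the list itself (flatMap form)
theorem flatMap_range_getD {β : Type} (l : List Char) (g : Char → List β) (d : Char) :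
    (List.range l.length).flatMap (fun i => g (l.getD i d)) = l.flatMap g := by
  induction l with
  | nil => simp
  | cons x xs ih =>
    rw [List.length_cons, List.range_succ_eq_map]
    simp only [List.flatMap_cons, List.flatMap_map]
    simp only [List.getD_cons_zero, List.getD_cons_succ]
    rw [ih]

-- A's first loop produces exactly the concatenation of the 5-bit groups
theorem bits_eq (chars : List Char) (acc : List Char) :
    (PySem.List.pyRange 0 (PySem.List.len chars)).foldl
      (fun bits i =>
        bits ++ pad_left (PySem.Int.toBinChars
          (((PySem.List.index? pvB32 (PySem.Chars.upperChar (PySem.List.pyGetD chars i ' '))).getD 0 : Nat) : Int)) 5 '0') acc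
    = acc ++ chars.flatMap pvF := by
  rw [show PySem.List.len chars = ((chars.length : Nat) : Int) from PySem.List.len_eq chars]
  rw [PySem.List.pyRange_zero_natCast]
  rw [List.foldl_map]
  have hfun : ∀ (bits : List Char) (i : Nat), i ∈ List.range chars.length →
      bits ++ pad_left (PySem.Int.toBinChars
        (((PySem.List.index? pvB32 (PySem.Chars.upperChar (PySem.List.pyGetD chars ((i : Nat) : Int) ' '))).getD 0 : Nat) : Int)) 5 '0'
      = bits ++ pvF (chars.getD i ' ') := by
    intro bits i _
    rw [PySem.List.pyGetD_natCast]
    rfl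
  rw [PySem.List.foldl_congr_mem (List.range chars.length) _
    (fun (bits : List Char) (i : Nat) => bits ++ pvF (chars.getD i ' ')) acc hfun]
  rw [PySem.List.foldl_append_eq_flatMap (fun i => pvF (chars.getD i ' ')) (List.range chars.length) acc]
  rw [flatMap_range_getD]

theorem pvF_length (c : Char) : (pvF c).length = 5 :=
  (pad5_spec _ (idx_lt (PySem.Chars.upperChar c))).1

theorem pvF_val (c : Char) :
    bitVal (pvF c) = (PySem.List.index? pvB32 (PySem.Chars.upperChar c)).getD 0 :=
  (pad5_spec _ (idx_lt (PySem.Chars.upperChar c))).2.1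

theorem pvF_bin (c : Char) : ∀ x ∈ pvF c, (x == '0' || x == '1') = true := by
  have := (pad5_spec _ (idx_lt (PySem.Chars.upperChar c))).2.2
  intro x hx
  exact List.all_eq_true.1 this x hx

theorem flat_bin (chars : List Char) : ∀ x ∈ chars.flatMap pvF, (x == '0' || x == '1') = true := by
  intro x hx
  rw [List.mem_flatMap] at hx
  obtain ⟨c, -, hxc⟩ := hx
  exact pvF_bin c x hxc

theorem hexget (v : Nat) (hv : v < 16) :
    PySem.List.pyGetD pvHexdigits ((v : Nat) : Int) ' ' = hexDigitChar v := by
  interval_cases v <;> decide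

-- B's inner while loop drains the buffer down to nbits % 4 bits, emitting
-- the nbits / 4 top nibbles in order
theorem drain_spec (q : Nat) : ∀ (m : Nat) (out : List Char) (a : Nat),
    m / 4 = q → a < 2 ^ m →
    pvDrain out a m = (out ++ digitsBE (a / 2 ^ (m % 4)) q, a % 2 ^ (m % 4), m % 4) := by
  induction q with
  | zero =>
    intro m out a hq ha
    have hm : m < 4 := by omega
    rw [pvDrain, dif_neg (by omega)]
    simp [digitsBE, Nat.mod_eq_of_lt hm, Nat.mod_eq_of_lt ha]
  | succ q ih =>
    intro m out a hq ha
    have hm4 : 4 ≤ m := by omega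
    have hm' : m - 4 = 4 * q + m % 4 := by omega
    have hmm : (m - 4) % 4 = m % 4 := by omega
    have htop : a >>> (m - 4) = a / 2 ^ (m - 4) := Nat.shiftRight_eq_div_pow a (m - 4)
    have htoplt : a / 2 ^ (m - 4) < 16 := by
      rw [Nat.div_lt_iff_lt_mul (by positivity)]
      calc a < 2 ^ m := ha
        _ = 16 * 2 ^ (m - 4) := by
            rw [show (16 : Nat) = 2 ^ 4 by norm_num, ← pow_add]
            congr 1
            omega
    have hand : a &&& ((1 <<< (m - 4)) - 1) = a % 2 ^ (m - 4) := by
      rw [Nat.shiftLeft_eq, one_mul]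
      exact Nat.and_two_pow_sub_one_eq_mod a (m - 4)
    have hw : a % 2 ^ (m - 4) < 2 ^ (4 * q + m % 4) := by
      rw [← hm']; exact Nat.mod_lt _ (by positivity)
    have hsplit : a = (a / 2 ^ (m - 4)) * 2 ^ (4 * q + m % 4) + a % 2 ^ (m - 4) := by
      rw [← hm', Nat.mul_comm]
      exact (Nat.div_add_mod a (2 ^ (m - 4))).symm
    have harith := peel_arith (a / 2 ^ (m - 4)) (a % 2 ^ (m - 4)) q (m % 4) hw
    have hunf : ∀ n, digitsBE n (q + 1)
        = hexDigitChar (n / 16 ^ q) :: digitsBE (n % 16 ^ q) q := fun n => rfl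
    have hd1 : a / 2 ^ (m % 4) / 16 ^ q = a / 2 ^ (m - 4) := by
      conv_lhs => rw [hsplit]
      exact harith.1
    have hd2 : a / 2 ^ (m % 4) % 16 ^ q = a % 2 ^ (m - 4) / 2 ^ (m % 4) := by
      conv_lhs => rw [hsplit]
      exact harith.2
    have hd3 : a % 2 ^ (m % 4) = a % 2 ^ (m - 4) % 2 ^ (m % 4) := by
      conv_lhs => rw [hsplit]
      exact peel_mod _ _ _ _
    rw [pvDrain, dif_pos hm4, htop, hand, hexget _ htoplt]
    rw [ih (m - 4) _ _ (by omega) (Nat.mod_lt _ (by positivity))]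
    rw [hmm, hunf, hd1, hd2, hd3]
    simp

-- splitting the leading qa hex digits off a number
theorem digitsBE_append (qa : Nat) : ∀ (qb x y : Nat), x < 16 ^ qa → y < 16 ^ qb →
    digitsBE (x * 16 ^ qb + y) (qa + qb) = digitsBE x qa ++ digitsBE y qb := by
  induction qa with
  | zero =>
    intro qb x y hx hy
    have : x = 0 := by omega
    subst this
    simp [digitsBE]
  | succ qa ih =>
    intro qb x y hx hy
    have hb : 0 < (16 : Nat) ^ qb := by positivity
    have hdiv : (x * 16 ^ qb + y) / 16 ^ (qa + qb) = x / 16 ^ qa := by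
      rw [pow_add, Nat.mul_comm (16 ^ qa), ← Nat.div_div_eq_div_mul,
        show x * 16 ^ qb + y = y + x * 16 ^ qb by ring, Nat.add_mul_div_right _ _ hb,
        Nat.div_eq_of_lt hy, Nat.zero_add]
    have h1 : x % 16 ^ qa < 16 ^ qa := Nat.mod_lt _ (by positivity)
    have hlt : x % 16 ^ qa * 16 ^ qb + y < 16 ^ (qa + qb) := by
      rw [pow_add]
      calc x % 16 ^ qa * 16 ^ qb + y < x % 16 ^ qa * 16 ^ qb + 16 ^ qb := by omega
        _ = (x % 16 ^ qa + 1) * 16 ^ qb := by ring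
        _ ≤ 16 ^ qa * 16 ^ qb := Nat.mul_le_mul_right _ (by omega)
    have hxs : x = x / 16 ^ qa * 16 ^ qa + x % 16 ^ qa := by
      rw [Nat.mul_comm]
      exact (Nat.div_add_mod x (16 ^ qa)).symm
    have hmod : (x * 16 ^ qb + y) % 16 ^ (qa + qb) = x % 16 ^ qa * 16 ^ qb + y := by
      calc (x * 16 ^ qb + y) % 16 ^ (qa + qb)
          = ((x % 16 ^ qa * 16 ^ qb + y) + x / 16 ^ qa * 16 ^ (qa + qb)) % 16 ^ (qa + qb) := by
            congr 1
            conv_lhs => rw [hxs]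
            rw [pow_add]
            ring
        _ = (x % 16 ^ qa * 16 ^ qb + y) % 16 ^ (qa + qb) := Nat.add_mul_mod_self_right _ _ _
        _ = x % 16 ^ qa * 16 ^ qb + y := Nat.mod_eq_of_lt hlt
    have hunf : ∀ n q, digitsBE n (q + 1)
        = hexDigitChar (n / 16 ^ q) :: digitsBE (n % 16 ^ q) q := fun n q => rfl
    rw [show qa + 1 + qb = (qa + qb) + 1 by omega, hunf, hdiv, hmod, hunf x qa,
      ih qb (x % 16 ^ qa) y h1 hy]
    rfl

-- the single pass of B: fold with (out, acc, nbits), invariant acc < 2^nbits, nbits < 4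
theorem stream_fold (cs : List Char) : ∀ (out : List Char) (acc nbits : Nat),
    nbits < 4 → acc < 2 ^ nbits →
    cs.foldl (fun (st : List Char × Nat × Nat) c =>
        pvDrain st.1 (st.2.1 * 32 + (PySem.List.index? pvB32 (PySem.Chars.upperChar c)).getD 0)
          (st.2.2 + 5))
      (out, acc, nbits)
    = (out ++ digitsBE ((acc * 2 ^ (cs.flatMap pvF).length + bitVal (cs.flatMap pvF))
          / 2 ^ ((nbits + (cs.flatMap pvF).length) % 4)) ((nbits + (cs.flatMap pvF).length) / 4),
       (acc * 2 ^ (cs.flatMap pvF).length + bitVal (cs.flatMap pvF))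
          % 2 ^ ((nbits + (cs.flatMap pvF).length) % 4),
       (nbits + (cs.flatMap pvF).length) % 4) := by
  induction cs with
  | nil =>
    intro out acc nbits hn ha
    simp [digitsBE, bitVal, Nat.mod_eq_of_lt hn, Nat.mod_eq_of_lt ha, Nat.div_eq_of_lt hn]
  | cons c cs ih =>
    intro out acc nbits hn ha
    have hvlt : bitVal (pvF c) < 32 := by
      have := bitVal_lt (pvF c)
      rwa [pvF_length] at this
    have hacc1 : acc * 32 + bitVal (pvF c) < 2 ^ (nbits + 5) := by
      have h32 : (32 : Nat) = 2 ^ 5 := by norm_num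
      calc acc * 32 + bitVal (pvF c) < acc * 32 + 32 := by omega
        _ = (acc + 1) * 32 := by ring
        _ ≤ 2 ^ nbits * 32 := Nat.mul_le_mul_right _ (by omega)
        _ = 2 ^ (nbits + 5) := by rw [h32, ← pow_add]
    simp only [List.foldl_cons, List.flatMap_cons]
    rw [← pvF_val c]
    rw [drain_spec ((nbits + 5) / 4) (nbits + 5) out (acc * 32 + bitVal (pvF c)) rfl hacc1]
    rw [ih _ _ _ (Nat.mod_lt _ (by omega)) (Nat.mod_lt _ (by positivity))]
    -- abbreviations
    set u := acc * 32 + bitVal (pvF c) with hu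
    set r1 := (nbits + 5) % 4 with hr1
    set q1 := (nbits + 5) / 4 with hq1
    set l2 := (cs.flatMap pvF).length with hl2
    set w2 := bitVal (cs.flatMap pvF) with hw2
    have hlenA : (pvF c ++ cs.flatMap pvF).length = 5 + l2 := by
      rw [List.length_append, pvF_length]
    have hWeq : acc * 2 ^ (pvF c ++ cs.flatMap pvF).length + bitVal (pvF c ++ cs.flatMap pvF)
        = u * 2 ^ l2 + w2 := by
      rw [hlenA, bitVal_append, ← hl2, ← hw2, hu]
      rw [show (5 : Nat) + l2 = l2 + 5 by omega, pow_add, show (32 : Nat) = 2 ^ 5 by norm_num]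
      ring
    have hM : nbits + (pvF c ++ cs.flatMap pvF).length = 4 * q1 + (r1 + l2) := by
      rw [hlenA]; omega
    have hM2mod : (4 * q1 + (r1 + l2)) % 4 = (r1 + l2) % 4 := by omega
    have hM2div : (4 * q1 + (r1 + l2)) / 4 = q1 + (r1 + l2) / 4 := by omega
    have hsplitM2 : r1 + l2 = 4 * ((r1 + l2) / 4) + (r1 + l2) % 4 := by omega
    have hu1lt : u / 2 ^ r1 < 16 ^ q1 := by
      apply shift_lt
      rw [show 4 * q1 + r1 = nbits + 5 by omega]
      exact hacc1
    have hW2lt : u % 2 ^ r1 * 2 ^ l2 + w2 < 2 ^ (4 * ((r1 + l2) / 4) + (r1 + l2) % 4) := by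
      rw [← hsplitM2, pow_add]
      have hm1 : u % 2 ^ r1 < 2 ^ r1 := Nat.mod_lt _ (by positivity)
      have hm2 : w2 < 2 ^ l2 := bitVal_lt _
      calc u % 2 ^ r1 * 2 ^ l2 + w2 < u % 2 ^ r1 * 2 ^ l2 + 2 ^ l2 := by omega
        _ = (u % 2 ^ r1 + 1) * 2 ^ l2 := by ring
        _ ≤ 2 ^ r1 * 2 ^ l2 := Nat.mul_le_mul_right _ (by omega)
    have hWsplit : u * 2 ^ l2 + w2
        = (u / 2 ^ r1) * 2 ^ (4 * ((r1 + l2) / 4) + (r1 + l2) % 4) + (u % 2 ^ r1 * 2 ^ l2 + w2) := by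
      rw [← hsplitM2]
      conv_lhs => rw [show u = u / 2 ^ r1 * 2 ^ r1 + u % 2 ^ r1 by
        rw [Nat.mul_comm]; exact (Nat.div_add_mod u (2 ^ r1)).symm]
      rw [pow_add]
      ring
    have hdivW : (u * 2 ^ l2 + w2) / 2 ^ ((r1 + l2) % 4)
        = (u / 2 ^ r1) * 16 ^ ((r1 + l2) / 4) + (u % 2 ^ r1 * 2 ^ l2 + w2) / 2 ^ ((r1 + l2) % 4) := by
      rw [hWsplit, peel_div]
    have hmodW : (u * 2 ^ l2 + w2) % 2 ^ ((r1 + l2) % 4)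
        = (u % 2 ^ r1 * 2 ^ l2 + w2) % 2 ^ ((r1 + l2) % 4) := by
      rw [hWsplit, peel_mod]
    have hy2 : (u % 2 ^ r1 * 2 ^ l2 + w2) / 2 ^ ((r1 + l2) % 4) < 16 ^ ((r1 + l2) / 4) :=
      shift_lt _ _ _ hW2lt
    rw [hWeq, hM, hM2mod, hM2div, hdivW, hmodW,
      digitsBE_append q1 ((r1 + l2) / 4) _ _ hu1lt hy2]
    simp

-- ===== VERDICT (by name: the statement is the Claim_ definition above) =====
theorem base32_to_hexadecimal_spec : Claim_equal_base32_to_hexadecimal := by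
  intro base32 _ _
  unfold Spec_base32_to_hexadecimal base32_to_hexadecimal base32_to_hexadecimal_alt
  simp only []
  set chars := base32.toList with hchars
  set flat := chars.flatMap pvF with hflat
  have hbits : (PySem.List.pyRange 0 (PySem.List.len chars)).foldl
      (fun bits i =>
        bits ++ pad_left (PySem.Int.toBinChars
          (((PySem.List.index? pvB32 (PySem.Chars.upperChar (PySem.List.pyGetD chars i ' '))).getD 0 : Nat) : Int)) 5 '0') []
      = flat := by
    rw [bits_eq]; rfl
  rw [hbits]
  have hlen2 : PySem.List.len flat = ((flat.length : Nat) : Int) := PySem.List.len_eq flat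
  rw [hlen2, pyRange_chunks, List.foldl_map]
  rw [chunk_fold (flat.length / 4) flat [] (flat_bin chars) rfl]
  rw [stream_fold chars [] 0 0 (by omega) (by omega)]
  rw [← hflat]
  simp
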